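-- pv_equiv track=rewrite | github.com/AjayCodes7/leetcode-solutions | 1426-find-n-unique-integers-sum-up-to-zero/find-n-unique-integers-sum-up-to-zero.py | sumZero
-- ===== SOURCE A (Python) =====
-- from typing import List
--
-- def sumZero(n: int) -> List[int]:
--     if n == 1:
--         return [0]
--
--     result = []
--     cursum = 0
--     for i in range(1,n):
--         result.append(i)
--         cursum += i
--     result.append(-cursum)
--     return result
-- ===== SOURCE B (Python) =====
-- def sumZero(n):
--     # first n-1 positives plus the closed-form negative of their Gauss sum
--     return list(range(1, n)) + [-(n * (n - 1)) // 2]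
-- ===== Notes on version B (the rewrite author's own statement) =====
-- stated objective: simpler
-- what changed: Replaces the accumulator loop and its special case by one expression: list(range(1,n)) plus the closed-form Gauss sum -(n*(n-1))//2; Pre_ restricts to the natural domain n >= 0, where negative counts (on which the two differ) are excluded.
-- outside the precondition, e.g. on sumZero(-3): A returns [0], B returns [-6]
import Mathlib
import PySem

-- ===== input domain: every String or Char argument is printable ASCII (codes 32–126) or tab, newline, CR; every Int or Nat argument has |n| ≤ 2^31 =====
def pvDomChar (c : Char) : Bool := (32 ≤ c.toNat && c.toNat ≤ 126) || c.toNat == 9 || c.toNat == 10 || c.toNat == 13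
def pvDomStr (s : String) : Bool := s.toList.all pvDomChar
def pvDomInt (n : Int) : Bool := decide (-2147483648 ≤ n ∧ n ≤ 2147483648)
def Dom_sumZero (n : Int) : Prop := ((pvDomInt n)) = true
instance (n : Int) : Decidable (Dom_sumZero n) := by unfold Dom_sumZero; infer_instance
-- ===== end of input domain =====

-- B replaces A's accumulator loop and n==1 special case by range(1,n) plus the closed-form Gauss sum (simpler).

-- ===== PORT A =====
def sumZero (n : Int) : List Int :=
  if n = 1 then [0]
  else
    let st := (PySem.List.pyRange 1 n 1).foldl
      (fun (st : List Int × Int) i => (st.1 ++ [i], st.2 + i)) ([], 0)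
    st.1 ++ [-st.2]

-- ===== PORT B =====
def sumZero_alt (n : Int) : List Int :=
  PySem.List.pyRange 1 n 1 ++ [-(PySem.Int.floordiv (n * (n - 1)) 2)]

-- ===== PRECONDITION & SPEC =====
-- Pre_ restricts to the task's natural domain n ≥ 0 (the problem guarantees n ≥ 1, and a count of
-- integers cannot be negative); for n < 0 the two implementations return different singletons.
def Pre_sumZero (n : Int) : Prop := 0 ≤ n
instance (n : Int) : Decidable (Pre_sumZero n) := by unfold Pre_sumZero; infer_instance
def pvWitness_sumZero : Int := 5
def Spec_sumZero (n : Int) (out : List Int) : Prop := out = sumZero_alt n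
instance (n : Int) (out : List Int) : Decidable (Spec_sumZero n out) := by unfold Spec_sumZero; infer_instance

-- ===== CLAIM (what is proved, stated in full; the proofs are below) =====
def Claim_equal_sumZero : Prop := ∀ (n : Int), Dom_sumZero n → Pre_sumZero n → Spec_sumZero n (sumZero n)

-- ===== LEMMAS AND PROOFS =====

theorem sumZero_foldl (l : List Int) (acc : List Int) (s : Int) :
    l.foldl (fun (st : List Int × Int) i => (st.1 ++ [i], st.2 + i)) (acc, s)
      = (acc ++ l, s + l.sum) := by
  induction l generalizing acc s with
  | nil => simp
  | cons x xs ih => simp [List.foldl, ih]; ring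

theorem sumZero_gauss (k : Nat) :
    2 * (PySem.List.pyRange 1 (k : Int) 1).sum = (k : Int) * ((k : Int) - 1) := by
  induction k with
  | zero => simp [PySem.List.pyRange_one_eq_nil]
  | succ m ih =>
    by_cases hm : m = 0
    · subst hm; simp [PySem.List.pyRange_one_eq_nil]
    · have h : ((m + 1 : Nat) : Int) = (m : Int) + 1 := by push_cast; ring
      rw [h, PySem.List.pyRange_one_succ_right (by omega)]
      simp [List.sum_append, mul_add, ih]; ring

theorem sumZero_floordiv (n : Int) (hn : 0 ≤ n) :
    PySem.Int.floordiv (n * (n - 1)) 2 = (PySem.List.pyRange 1 n 1).sum := by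
  obtain ⟨k, rfl⟩ := Int.eq_ofNat_of_zero_le hn
  rw [← sumZero_gauss k, PySem.Int.floordiv_eq_ediv_of_pos (by norm_num)]
  omega

-- ===== VERDICT (by name: the statement is the Claim_ definition above) =====
theorem sumZero_spec : Claim_equal_sumZero := by
  intro n _ hpre
  unfold Spec_sumZero sumZero sumZero_alt
  rw [sumZero_floordiv n hpre]
  by_cases h1 : n = 1
  · subst h1
    simp [PySem.List.pyRange_one_eq_nil]
  · simp [h1, sumZero_foldl]
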